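-- pv_equiv track=rewrite | github.com/ps-nithin/pyrebel_old | sample.py | get_best_index
-- ===== SOURCE A (Python) =====
-- def get_best_index(index_list):
--     #get sym objects with same index value order
--     #by decreasing length
--     index_list=sorted(index_list,key=lambda x: x[0])
--     best_index=index_list[0][0]
--     order_by_length=list()
--     for r in index_list:
--         if r[0]==best_index:
--             order_by_length.append(r)
--     order_by_length=sorted(order_by_length,key=lambda x: x[2],reverse=True)
--     return order_by_length
--     return [order_by_length[0][1],order_by_length[0][2]]
-- ===== SOURCE B (Python) =====
-- def get_best_index(index_list):
--     # one pass to find the minimal first component, collect its group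
--     # from the original list, then sort just that group by x[2] descending
--     best = min(r[0] for r in index_list)
--     group = [r for r in index_list if r[0] == best]
--     group.sort(key=lambda x: x[2], reverse=True)
--     return group
-- ===== Notes on version B (the rewrite author's own statement) =====
-- stated objective: alternative
-- what changed: Instead of sorting the whole list by first component and filtering the sorted list, B finds the minimum first component in one pass, filters the original list (stability of Python's sort makes the group orders identical), and sorts only that group by x[2] descending; it avoids the full sort but is not measurably faster on duplicate-heavy inputs where the group is the whole list.
import Mathlib
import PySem

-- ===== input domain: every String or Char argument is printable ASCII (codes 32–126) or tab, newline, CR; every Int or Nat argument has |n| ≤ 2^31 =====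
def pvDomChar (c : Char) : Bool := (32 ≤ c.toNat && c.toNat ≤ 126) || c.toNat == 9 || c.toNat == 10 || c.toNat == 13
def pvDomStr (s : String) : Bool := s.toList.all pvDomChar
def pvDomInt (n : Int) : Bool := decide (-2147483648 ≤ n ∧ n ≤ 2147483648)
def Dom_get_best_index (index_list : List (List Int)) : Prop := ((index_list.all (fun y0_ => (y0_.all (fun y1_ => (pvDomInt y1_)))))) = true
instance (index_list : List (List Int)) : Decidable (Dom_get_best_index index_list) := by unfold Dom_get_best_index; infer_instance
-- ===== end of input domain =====

-- B replaces A's full sort-then-filter by a single min pass plus a filter of the original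
-- list, sorting only the selected group; return values agree on Pre_ (where A returns at all).

-- ===== PORT A =====
def get_best_index (index_list : List (List Int)) : List (List Int) :=
  let index_list' := PySem.List.sorted index_list (fun x => PySem.List.pyGetD x 0 0) false
  let best_index := PySem.List.pyGetD (PySem.List.pyGetD index_list' 0 []) 0 0
  let order_by_length := index_list'.foldl
    (fun acc r => if PySem.List.pyGetD r 0 0 == best_index then acc ++ [r] else acc) []
  PySem.List.sorted order_by_length (fun x => PySem.List.pyGetD x 2 0) true

-- ===== PORT B =====
def get_best_index_alt (index_list : List (List Int)) : List (List Int) :=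
  match PySem.List.min? (index_list.map (fun r => PySem.List.pyGetD r 0 0)) (fun v => v) with
  | none => []   -- min() raises on an empty list; excluded by Pre_
  | some best =>
    let group := index_list.filter (fun r => PySem.List.pyGetD r 0 0 == best)
    PySem.List.sorted group (fun x => PySem.List.pyGetD x 2 0) true

-- ===== PRECONDITION & SPEC =====
-- Pre_ excludes exactly the inputs on which Python A raises IndexError: the empty list,
-- lists containing an empty row (r[0]), and lists whose minimal-first rows have fewer
-- than 3 entries (x[2] in the final sort).
def Pre_get_best_index (index_list : List (List Int)) : Prop :=
  index_list ≠ [] ∧ ∀ r ∈ index_list, r ≠ [] ∧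
    ((∀ s ∈ index_list, PySem.List.pyGetD r 0 0 ≤ PySem.List.pyGetD s 0 0) → 3 ≤ r.length)
instance (index_list : List (List Int)) : Decidable (Pre_get_best_index index_list) := by
  unfold Pre_get_best_index; infer_instance

def pvWitness_get_best_index : List (List Int) := [[0, 1, 2], [5, 0], [0, 7, 1]]

def Spec_get_best_index (index_list : List (List Int)) (out : List (List Int)) : Prop := out = get_best_index_alt index_list
instance (index_list : List (List Int)) (out : List (List Int)) : Decidable (Spec_get_best_index index_list out) := by unfold Spec_get_best_index; infer_instance

-- ===== CLAIM (what is proved, stated in full; the proofs are below) =====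
def Claim_equal_get_best_index : Prop := ∀ (index_list : List (List Int)), Dom_get_best_index index_list → Pre_get_best_index index_list → Spec_get_best_index index_list (get_best_index index_list)

-- ===== LEMMAS AND PROOFS =====

-- insertBy with the key comparator preserves key-sortedness
lemma pairwise_insertBy_key {α : Type} (key : α → Int) (x : α) (ys : List α)
    (h : ys.Pairwise (fun a b => key a ≤ key b)) :
    (PySem.List.insertBy (fun a b => decide (key a < key b)) x ys).Pairwise
      (fun a b => key a ≤ key b) := by
  induction ys with
  | nil => simp [PySem.List.insertBy]
  | cons y ys ih =>
    rw [List.pairwise_cons] at h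
    simp only [PySem.List.insertBy]
    split_ifs with hlt
    · simp only [decide_eq_true_eq] at hlt
      refine List.pairwise_cons.mpr ⟨?_, List.pairwise_cons.mpr ⟨h.1, h.2⟩⟩
      intro z hz
      rcases List.mem_cons.mp hz with rfl | hz
      · exact le_of_lt hlt
      · exact le_trans (le_of_lt hlt) (h.1 z hz)
    · simp only [decide_eq_true_eq, not_lt] at hlt
      refine List.pairwise_cons.mpr ⟨?_, ih h.2⟩
      intro z hz
      rcases (PySem.List.mem_insertBy _ x z ys).mp hz with rfl | hz
      · exact hlt
      · exact h.1 z hz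

-- stability of one insertion, equal-key case: x goes to the end of its key class
lemma filter_insertBy_eq {α : Type} (key : α → Int) (m : Int) (x : α) (hx : key x = m)
    (ys : List α) (hs : ys.Pairwise (fun a b => key a ≤ key b)) :
    (PySem.List.insertBy (fun a b => decide (key a < key b)) x ys).filter
        (fun y => key y == m)
      = ys.filter (fun y => key y == m) ++ [x] := by
  induction ys with
  | nil => simp [PySem.List.insertBy, hx]
  | cons y ys ih =>
    rw [List.pairwise_cons] at hs
    simp only [PySem.List.insertBy]
    split_ifs with hlt
    · simp only [decide_eq_true_eq, hx] at hlt
      have hy : (key y == m) = false := by simp; omega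
      have hall : (y :: ys).filter (fun y => key y == m) = [] := by
        apply List.filter_eq_nil_iff.mpr
        intro z hz
        rcases List.mem_cons.mp hz with rfl | hz
        · simp; omega
        · have := hs.1 z hz; simp; omega
      rw [hall]
      simp [hall, hx]
    · rw [List.filter_cons, List.filter_cons, ih hs.2]
      by_cases hy : (key y == m) = true <;> simp [hy]

-- stability of one insertion, different-key case: the key class is untouched
lemma filter_insertBy_ne {α : Type} (key : α → Int) (m : Int) (x : α) (hx : key x ≠ m)
    (ys : List α) :
    (PySem.List.insertBy (fun a b => decide (key a < key b)) x ys).filter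
        (fun y => key y == m)
      = ys.filter (fun y => key y == m) := by
  induction ys with
  | nil => simp [PySem.List.insertBy, hx]
  | cons y ys ih =>
    simp only [PySem.List.insertBy]
    split_ifs with hlt
    · simp [List.filter_cons, hx]
    · rw [List.filter_cons, List.filter_cons, ih]

-- insertion-sort loop invariant: the key class of the result is acc's class then xs's class
lemma filter_foldl_insertBy {α : Type} (key : α → Int) (m : Int) :
    ∀ (xs acc : List α), acc.Pairwise (fun a b => key a ≤ key b) →
    (xs.foldl (fun acc x => PySem.List.insertBy (fun a b => decide (key a < key b)) x acc)
        acc).filter (fun y => key y == m)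
      = acc.filter (fun y => key y == m) ++ xs.filter (fun y => key y == m) := by
  intro xs
  induction xs with
  | nil => intro acc _; simp
  | cons x xs ih =>
    intro acc hacc
    rw [List.foldl_cons, ih _ (pairwise_insertBy_key key x acc hacc), List.filter_cons]
    by_cases hx : key x = m
    · rw [filter_insertBy_eq key m x hx acc hacc]
      simp [hx]
    · rw [filter_insertBy_ne key m x hx acc]
      simp [hx]

-- STABILITY: filtering a key class out of Python's stable sort = filtering the original list
lemma filter_sorted_eq {α : Type} (key : α → Int) (m : Int) (xs : List α) :
    (PySem.List.sorted xs key false).filter (fun y => key y == m)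
      = xs.filter (fun y => key y == m) := by
  rw [PySem.List.sorted_eq_foldl_insertBy]
  simpa using filter_foldl_insertBy key m xs [] List.Pairwise.nil

-- the head of sorted(xs, key) carries the minimal key
lemma key_head_sorted_eq_min {α : Type} [Inhabited α] (key : α → Int) (xs : List α)
    (h t : _) (hst : PySem.List.sorted xs key false = h :: t)
    (m : Int) (hm : PySem.List.min? (xs.map key) (fun v => v) = some m) :
    key h = m := by
  have hmem : m ∈ xs.map key := PySem.List.min?_mem hm
  rcases List.mem_map.mp hmem with ⟨s, hs, rfl⟩
  have h1 : key h ≤ key s := PySem.List.key_head_sorted_le xs key hst s hs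
  have h2 : key s ≤ key h := by
    have hh : h ∈ xs := (PySem.List.mem_sorted xs key false h).mp (hst ▸ List.mem_cons_self ..)
    exact PySem.List.min?_isMin hm (key h) (List.mem_map_of_mem hh)
  omega

-- ===== VERDICT (by name: the statement is the Claim_ definition above) =====
theorem get_best_index_spec : Claim_equal_get_best_index := by
  intro index_list _ hpre
  unfold Spec_get_best_index get_best_index get_best_index_alt
  obtain ⟨hne, -⟩ := hpre
  set key : List Int → Int := fun r => PySem.List.pyGetD r 0 0 with hkey
  obtain ⟨h, t, hst⟩ : ∃ h t, PySem.List.sorted index_list key false = h :: t := by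
    rcases hs : PySem.List.sorted index_list key false with _ | ⟨h, t⟩
    · exact absurd ((PySem.List.sorted_eq_nil_iff index_list key false).mp hs) hne
    · exact ⟨h, t, rfl⟩
  obtain ⟨m, hm⟩ : ∃ m, PySem.List.min? (index_list.map key) (fun v => v) = some m := by
    rcases ho : PySem.List.min? (index_list.map key) (fun v => v) with _ | m
    · rw [PySem.List.min?_eq_none_iff] at ho
      exact absurd (List.map_eq_nil_iff.mp ho) hne
    · exact ⟨m, rfl⟩
  have hbest : PySem.List.pyGetD (PySem.List.pyGetD (PySem.List.sorted index_list key false) 0 []) 0 0 = m := by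
    rw [hst]
    have : PySem.List.pyGetD (h :: t) (0 : Int) [] = h := by
      simp [PySem.List.pyGetD, PySem.List.pyGet?, PySem.List.pyIdx?]
    rw [this]
    exact key_head_sorted_eq_min key index_list h t hst m hm
  rw [hm]
  simp only [hbest, PySem.List.foldl_append_if_eq_filter, List.nil_append]
  rw [filter_sorted_eq key m index_list]
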